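-- pv_equiv track=rewrite | github.com/fromjyce/PythonPrograms | PythonPrograms/CodeVita2.py | count_possibilities
-- ===== SOURCE A (Python) =====
-- def count_possibilities(row):
--     count = 0
--     n = len(row)
--
--     for i in range(n - 2):
--         for j in range(i + 1, n - 1):
--             for k in range(j + 1, n):
--                 if row[i] != row[j] and row[j] != row[k] and row[i] != row[k]:
--                     count += 1
--
--     return count
-- ===== SOURCE B (Python) =====
-- def count_possibilities(row):
--     # One pass: treat each element as the largest index k of a triple.
--     # pairs = number of index pairs (i<j) among the seen prefix with row[i] != row[j];
--     # of those, c*(n-c) involve an element equal to x, so the rest complete a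
--     # pairwise-distinct triple with x.
--     counts = {}
--     n = 0
--     pairs = 0
--     total = 0
--     for x in row:
--         c = counts.get(x, 0)
--         total += pairs - c * (n - c)
--         pairs += n - c
--         counts[x] = c + 1
--         n += 1
--     return total
-- ===== Notes on version B (the rewrite author's own statement) =====
-- stated objective: faster
-- what changed: replaces the triple nested index loop by a single left-to-right pass that maintains a value-frequency dict and a running count of distinct-value pairs, adding for each new element the pairs it completes into a pairwise-distinct triple
import Mathlib
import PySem

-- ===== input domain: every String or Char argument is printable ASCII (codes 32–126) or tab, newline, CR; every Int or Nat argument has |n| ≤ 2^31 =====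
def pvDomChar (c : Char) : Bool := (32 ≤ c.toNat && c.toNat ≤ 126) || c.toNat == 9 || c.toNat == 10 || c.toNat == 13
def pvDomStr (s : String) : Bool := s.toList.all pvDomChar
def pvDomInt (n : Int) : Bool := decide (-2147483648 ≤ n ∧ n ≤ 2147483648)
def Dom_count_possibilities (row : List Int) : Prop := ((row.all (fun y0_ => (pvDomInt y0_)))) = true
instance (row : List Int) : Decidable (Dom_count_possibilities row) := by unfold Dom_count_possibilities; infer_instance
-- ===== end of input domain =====

-- B replaces A's triple nested index loop by one left-to-right pass that keeps a value-frequency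
-- dict and a running count of distinct-value pairs (objective: faster); same return value, proved below.

-- ===== PORT A =====
-- literal port of the triple nested loop; indices are always in range, so pyGetD's default is never used
def count_possibilities (row : List Int) : Int :=
  let n : Int := (row.length : Int)
  (PySem.List.pyRange 0 (n - 2) 1).foldl (fun count i =>
    (PySem.List.pyRange (i + 1) (n - 1) 1).foldl (fun count j =>
      (PySem.List.pyRange (j + 1) n 1).foldl (fun count k =>
        if PySem.List.pyGetD row i 0 ≠ PySem.List.pyGetD row j 0 ∧
           PySem.List.pyGetD row j 0 ≠ PySem.List.pyGetD row k 0 ∧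
           PySem.List.pyGetD row i 0 ≠ PySem.List.pyGetD row k 0
        then count + 1 else count) count) count) 0

-- ===== PORT B =====
-- the body of Source B's loop; state = (total, pairs, counts, n), exactly Source B's variables
def bstep (st : Int × Int × PySem.Dict Int Int × Int) (x : Int) : Int × Int × PySem.Dict Int Int × Int :=
  let c := PySem.Dict.getD st.2.2.1 x 0
  (st.1 + (st.2.1 - c * (st.2.2.2 - c)),
   st.2.1 + (st.2.2.2 - c),
   PySem.Dict.insert st.2.2.1 x (c + 1),
   st.2.2.2 + 1)

def count_possibilities_alt (row : List Int) : Int :=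
  (row.foldl bstep ((0 : Int), (0 : Int), (PySem.Dict.empty : PySem.Dict Int Int), (0 : Int))).1

-- ===== PRECONDITION & SPEC =====
def Spec_count_possibilities (row : List Int) (out : Int) : Prop := out = count_possibilities_alt row
instance (row : List Int) (out : Int) : Decidable (Spec_count_possibilities row out) := by unfold Spec_count_possibilities; infer_instance

-- ===== CLAIM (what is proved, stated in full; the proofs are below) =====
def Claim_equal_count_possibilities : Prop := ∀ (row : List Int), Dom_count_possibilities row → Spec_count_possibilities row (count_possibilities row)

-- ===== LEMMAS AND PROOFS =====

-- number of z in l with a, b, z pairwise distinct (one innermost loop of A)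
def cnt3 (a b : Int) (l : List Int) : Int :=
  (l.countP (fun z => decide (a ≠ b ∧ b ≠ z ∧ a ≠ z)) : Int)

-- fold over the strict suffixes of a list
def sfold (g : Int → List Int → Int) : List Int → Int
  | [] => 0
  | y :: ys => g y ys + sfold g ys

-- number of pairs j < k in l with a, l[j], l[k] pairwise distinct
def pairs2 (a : Int) (l : List Int) : Int := sfold (fun y ys => cnt3 a y ys) l

-- number of triples i < j < k in l with pairwise distinct values (structural form of A's count)
def brA (l : List Int) : Int := sfold (fun x xs => pairs2 x xs) l

-- number of pairs i < j in l with distinct values (Source B's `pairs`)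
def pd : List Int → Int
  | [] => 0
  | y :: ys => ((ys.countP (fun z => decide (y ≠ z))) : Int) + pd ys

-- number of pairs i < j in l with distinct values, both different from x
def pdn (x : Int) : List Int → Int
  | [] => 0
  | y :: ys => ((ys.countP (fun z => decide (y ≠ z ∧ z ≠ x ∧ y ≠ x))) : Int) + pdn x ys

lemma inner_eq (row : List Int) (a b j c : Int) (hj : 0 ≤ j + 1) :
    (PySem.List.pyRange (j + 1) ((row.length : Int)) 1).foldl
      (fun count k => if a ≠ b ∧ b ≠ PySem.List.pyGetD row k 0 ∧ a ≠ PySem.List.pyGetD row k 0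
        then count + 1 else count) c
    = c + cnt3 a b (row.drop (j + 1).toNat) := by
  rw [PySem.List.foldl_pyRange_pyGetD' row 0
      (fun count v => if a ≠ b ∧ b ≠ v ∧ a ≠ v then count + 1 else count) c hj]
  rw [PySem.List.foldl_ite_add_one]
  rfl

lemma suffix_fold (row : List Int) (g : Int → List Int → Int) :
    ∀ (fuel : Nat) (t c : Int), 0 ≤ t → t ≤ (row.length : Int) →
      (row.length : Int) - t ≤ (fuel : Int) →
    (PySem.List.pyRange t ((row.length : Int)) 1).foldl
      (fun count j => count + g (PySem.List.pyGetD row j 0) (row.drop (j + 1).toNat)) c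
    = c + sfold g (row.drop t.toNat) := by
  intro fuel
  induction fuel with
  | zero =>
      intro t c h0 hle hf
      have ht : t.toNat = row.length := by omega
      rw [PySem.List.pyRange_one_eq_nil (by omega), ht, List.drop_length]
      simp [sfold]
  | succ m ih =>
      intro t c h0 hle hf
      by_cases hlt : t < (row.length : Int)
      · rw [PySem.List.pyRange_one_cons hlt]
        simp only [List.foldl_cons]
        have htn : t.toNat < row.length := by omega
        have hget : PySem.List.pyGetD row t 0 = row[t.toNat] :=
          PySem.List.pyGetD_eq_getElem row 0 h0 (by omega)
        have ht1 : (t + 1).toNat = t.toNat + 1 := by omega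
        have hdrop : row.drop t.toNat = row[t.toNat] :: row.drop (t.toNat + 1) :=
          List.drop_eq_getElem_cons htn
        rw [ih (t + 1) _ (by omega) (by omega) (by omega)]
        rw [hdrop, ht1, hget]
        simp [sfold]
        ring
      · have htn : t.toNat = row.length := by omega
        rw [PySem.List.pyRange_one_eq_nil (by omega), htn, List.drop_length]
        simp [sfold]

lemma brA_short (l : List Int) (h : l.length ≤ 2) : brA l = 0 := by
  match l with
  | [] => rfl
  | [y] => simp [brA, sfold, pairs2]
  | [y, z] => simp [brA, sfold, pairs2, cnt3]
  | y :: z :: w :: t => simp at h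

lemma pairs2_short (a : Int) (l : List Int) (h : l.length ≤ 1) : pairs2 a l = 0 := by
  match l with
  | [] => rfl
  | [y] => simp [pairs2, sfold, cnt3]
  | y :: z :: t => simp at h

lemma A_eq_brA (row : List Int) : count_possibilities row = brA row := by
  unfold count_possibilities
  simp only []
  by_cases h3 : (row.length : Int) < 3
  · rw [PySem.List.pyRange_one_eq_nil (by omega)]
    simp only [List.foldl_nil]
    exact (brA_short row (by omega)).symm
  · push_neg at h3
    have hcongr : ∀ (count : Int), ∀ i ∈ PySem.List.pyRange 0 ((row.length : Int) - 2),
        (fun count i =>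
          (PySem.List.pyRange (i + 1) ((row.length : Int) - 1) 1).foldl (fun count j =>
            (PySem.List.pyRange (j + 1) (row.length : Int) 1).foldl (fun count k =>
              if PySem.List.pyGetD row i 0 ≠ PySem.List.pyGetD row j 0 ∧
                 PySem.List.pyGetD row j 0 ≠ PySem.List.pyGetD row k 0 ∧
                 PySem.List.pyGetD row i 0 ≠ PySem.List.pyGetD row k 0
              then count + 1 else count) count) count) count i
        = count + pairs2 (PySem.List.pyGetD row i 0) (row.drop (i + 1).toNat) := by
      intro count i hi
      rw [PySem.List.mem_pyRange_one] at hi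
      simp only
      rw [PySem.List.foldl_congr_mem _ _
        (fun count j => count + cnt3 (PySem.List.pyGetD row i 0) (PySem.List.pyGetD row j 0)
          (row.drop (j + 1).toNat)) count
        (by
          intro acc j hj
          rw [PySem.List.mem_pyRange_one] at hj
          exact inner_eq row _ _ j acc (by omega))]
      have hfull := suffix_fold row
        (fun v suf => cnt3 (PySem.List.pyGetD row i 0) v suf) row.length (i + 1) count
        (by omega) (by omega) (by omega)
      have e : PySem.List.pyRange (i + 1) ((row.length : Int))
          = PySem.List.pyRange (i + 1) ((row.length : Int) - 1) ++ [(row.length : Int) - 1] := by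
        have h := PySem.List.pyRange_one_succ_right
          (a := i + 1) (b := (row.length : Int) - 1) (by omega)
        rw [show ((row.length : Int) - 1) + 1 = (row.length : Int) by ring] at h
        exact h
      rw [e, List.foldl_append] at hfull
      simp only [List.foldl_cons, List.foldl_nil] at hfull
      have hz : row.drop (((row.length : Int) - 1) + 1).toNat = [] := by
        rw [show (((row.length : Int) - 1) + 1).toNat = row.length by omega, List.drop_length]
      rw [hz] at hfull
      simp only [cnt3, List.countP_nil, Nat.cast_zero, add_zero] at hfull
      exact hfull
    rw [PySem.List.foldl_congr_mem _ _
      (fun count i => count + pairs2 (PySem.List.pyGetD row i 0) (row.drop (i + 1).toNat)) 0 hcongr]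
    have hfull2 := suffix_fold row (fun v suf => pairs2 v suf) row.length 0 0
      (le_refl 0) (by omega) (by omega)
    have e2 : PySem.List.pyRange 0 ((row.length : Int))
        = PySem.List.pyRange 0 ((row.length : Int) - 2)
          ++ [(row.length : Int) - 2, (row.length : Int) - 1] := by
      rw [PySem.List.pyRange_one_append 0 ((row.length : Int) - 2) (row.length : Int)
        (by omega) (by omega)]
      congr 1
      rw [PySem.List.pyRange_one_cons (by omega),
        show ((row.length : Int) - 2) + 1 = (row.length : Int) - 1 by ring,
        PySem.List.pyRange_one_cons (by omega),
        show ((row.length : Int) - 1) + 1 = (row.length : Int) by ring,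
        PySem.List.pyRange_one_eq_nil (le_refl _)]
    rw [e2, List.foldl_append] at hfull2
    simp only [List.foldl_cons, List.foldl_nil] at hfull2
    have hz1 : pairs2 (PySem.List.pyGetD row ((row.length : Int) - 2) 0)
        (row.drop (((row.length : Int) - 2) + 1).toNat) = 0 := by
      apply pairs2_short
      simp only [List.length_drop]
      omega
    have hz2 : pairs2 (PySem.List.pyGetD row ((row.length : Int) - 1) 0)
        (row.drop (((row.length : Int) - 1) + 1).toNat) = 0 := by
      apply pairs2_short
      simp only [List.length_drop]
      omega
    rw [hz1, hz2] at hfull2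
    simp only [List.drop_zero, Int.toNat_zero] at hfull2
    have : sfold (fun v suf => pairs2 v suf) row = brA row := rfl
    omega

lemma pairs2_append (a x : Int) (p : List Int) :
    pairs2 a (p ++ [x]) = pairs2 a p + ((p.countP (fun y => decide (a ≠ y ∧ y ≠ x ∧ a ≠ x))) : Int) := by
  induction p with
  | nil => simp [pairs2, sfold, cnt3]
  | cons y ys ih =>
      simp only [List.cons_append, pairs2, sfold, cnt3, List.countP_append, List.countP_cons] at *
      push_cast
      by_cases hc : a ≠ y ∧ y ≠ x ∧ a ≠ x <;> simp [hc] at * <;> omega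

lemma brA_append (x : Int) (p : List Int) : brA (p ++ [x]) = brA p + pdn x p := by
  induction p with
  | nil => simp [brA, sfold, pairs2, pdn]
  | cons y ys ih =>
      simp only [List.cons_append, brA, sfold, pdn] at *
      rw [pairs2_append, ih]
      ring

lemma pd_append (x : Int) (p : List Int) :
    pd (p ++ [x]) = pd p + ((p.length : Int) - (p.count x : Int)) := by
  induction p with
  | nil => simp [pd]
  | cons y ys ih =>
      simp only [List.cons_append, pd, List.countP_append, List.countP_cons, List.countP_nil,
        List.count_cons, List.length_cons] at *
      by_cases hc : y = x
      · subst hc; simp at *; omega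
      · simp [hc] at *; omega

lemma count_ne_aux (x : Int) (ys : List Int) :
    ys.countP (fun z => decide (x ≠ z)) + ys.count x = ys.length := by
  induction ys with
  | nil => simp
  | cons z t ih =>
      simp only [List.countP_cons, List.count_cons, List.length_cons]
      by_cases h : z = x
      · subst h; simp at ih ⊢; omega
      · simp [h, Ne.symm h] at ih ⊢; omega

lemma countP_pair_aux (x y : Int) (hyx : y ≠ x) (ys : List Int) :
    ys.countP (fun z => decide (y ≠ z ∧ z ≠ x ∧ y ≠ x)) + ys.count x
      = ys.countP (fun z => decide (y ≠ z)) := by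
  induction ys with
  | nil => simp
  | cons z t ih =>
      simp only [List.countP_cons, List.count_cons]
      by_cases h : z = x
      · subst h; simp [hyx] at ih ⊢; omega
      · by_cases h2 : y = z <;> simp [h, hyx, h2] at ih ⊢ <;> omega

lemma pd_eq_pdn (x : Int) (p : List Int) :
    pd p = pdn x p + (p.count x : Int) * ((p.length : Int) - (p.count x : Int)) := by
  induction p with
  | nil => simp [pd, pdn]
  | cons y ys ih =>
      simp only [pd, pdn, List.count_cons, List.length_cons]
      by_cases h : y = x
      · subst h
        have h1 := count_ne_aux y ys
        have hcc : (ys.countP fun z => decide (y ≠ z ∧ z ≠ y ∧ y ≠ y)) = 0 := by simp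
        rw [hcc]
        have h1' : ((ys.countP fun z => decide (y ≠ z)) : Int)
            = (ys.length : Int) - (ys.count y : Int) := by
          push_cast [← h1]; ring
        rw [h1', ih]
        simp
        ring
      · have h2 := countP_pair_aux x y h ys
        have h2' : ((ys.countP fun z => decide (y ≠ z ∧ z ≠ x ∧ y ≠ x)) : Int)
            = ((ys.countP fun z => decide (y ≠ z)) : Int) - (ys.count x : Int) := by
          push_cast [← h2]; ring
        rw [h2', ih]
        simp [h]
        ring

lemma alt_inv (l : List Int) : ∀ (p : List Int) (d : PySem.Dict Int Int),
    (∀ v : Int, PySem.Dict.getD d v 0 = (p.count v : Int)) →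
    (l.foldl bstep (brA p, pd p, d, (p.length : Int))).1 = brA (p ++ l) := by
  induction l with
  | nil => intro p d hd; simp
  | cons x t ih =>
      intro p d hd
      rw [List.foldl_cons]
      have h1 : brA (p ++ [x])
          = brA p + (pd p - (p.count x : Int) * ((p.length : Int) - (p.count x : Int))) := by
        rw [brA_append, pd_eq_pdn x p]; ring
      have h2 : pd (p ++ [x]) = pd p + ((p.length : Int) - (p.count x : Int)) := pd_append x p
      have h4 : (((p ++ [x]).length : Nat) : Int) = (p.length : Int) + 1 := by simp
      have hstep : bstep (brA p, pd p, d, (p.length : Int)) x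
          = (brA (p ++ [x]), pd (p ++ [x]), PySem.Dict.insert d x ((p.count x : Int) + 1),
             ((p ++ [x]).length : Int)) := by
        unfold bstep
        simp only [hd x, h1, h2, h4]
      rw [hstep]
      have hd' : ∀ v : Int, PySem.Dict.getD (PySem.Dict.insert d x ((p.count x : Int) + 1)) v 0
          = ((p ++ [x]).count v : Int) := by
        intro v
        rw [PySem.Dict.getD_insert]
        by_cases hv : v = x
        · subst hv; simp [List.count_append]
        · simp [hv, hd v, List.count_append, Ne.symm hv]
      have := ih (p ++ [x]) _ hd'
      rw [this, List.append_assoc]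
      rfl

lemma B_eq_brA (row : List Int) : count_possibilities_alt row = brA row := by
  have h := alt_inv row [] PySem.Dict.empty (by intro v; simp)
  simpa [count_possibilities_alt, brA, pd, sfold] using h

-- ===== VERDICT (by name: the statement is the Claim_ definition above) =====
theorem count_possibilities_spec : Claim_equal_count_possibilities := by
  intro row _
  unfold Spec_count_possibilities
  rw [A_eq_brA, B_eq_brA]
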